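-- pv_equiv track=rewrite | github.com/oli-pad/Salitix_Projects | Price_File_Builder/Sainsburys/Sainsbury_promo_form.py | mulitple_promo
-- ===== SOURCE A (Python) =====
-- def mulitple_promo(pass1,pass2,pass3,pass4,pass5,pass6,pass7,pass8):
--     group_index=[]
--     for i in pass1:
--         if i in pass2:
--             if i in pass3:
--                 if i in pass4:
--                     if i in pass5:
--                         if i in pass6:
--                             if i in pass7:
--                                 if i in pass8:
--                                     group_index.append(i)
--                                 else:continue
--                             else:continue
--                         else:continue
--                     else:continue
--                 else:continue
--             else:continue
--         else:continue
--     return group_index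
-- ===== SOURCE B (Python) =====
-- def mulitple_promo(pass1, pass2, pass3, pass4, pass5, pass6, pass7, pass8):
--     result = list(pass1)
--     for p in (pass2, pass3, pass4, pass5, pass6, pass7, pass8):
--         result = [i for i in result if i in p]
--     return result
-- ===== Notes on version B (the rewrite author's own statement) =====
-- stated objective: simpler
-- what changed: Instead of scanning pass1 once with eight nested membership ifs appending to an accumulator, B loops over the seven other passes and progressively filters the intermediate list with a comprehension at each step.
import Mathlib
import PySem

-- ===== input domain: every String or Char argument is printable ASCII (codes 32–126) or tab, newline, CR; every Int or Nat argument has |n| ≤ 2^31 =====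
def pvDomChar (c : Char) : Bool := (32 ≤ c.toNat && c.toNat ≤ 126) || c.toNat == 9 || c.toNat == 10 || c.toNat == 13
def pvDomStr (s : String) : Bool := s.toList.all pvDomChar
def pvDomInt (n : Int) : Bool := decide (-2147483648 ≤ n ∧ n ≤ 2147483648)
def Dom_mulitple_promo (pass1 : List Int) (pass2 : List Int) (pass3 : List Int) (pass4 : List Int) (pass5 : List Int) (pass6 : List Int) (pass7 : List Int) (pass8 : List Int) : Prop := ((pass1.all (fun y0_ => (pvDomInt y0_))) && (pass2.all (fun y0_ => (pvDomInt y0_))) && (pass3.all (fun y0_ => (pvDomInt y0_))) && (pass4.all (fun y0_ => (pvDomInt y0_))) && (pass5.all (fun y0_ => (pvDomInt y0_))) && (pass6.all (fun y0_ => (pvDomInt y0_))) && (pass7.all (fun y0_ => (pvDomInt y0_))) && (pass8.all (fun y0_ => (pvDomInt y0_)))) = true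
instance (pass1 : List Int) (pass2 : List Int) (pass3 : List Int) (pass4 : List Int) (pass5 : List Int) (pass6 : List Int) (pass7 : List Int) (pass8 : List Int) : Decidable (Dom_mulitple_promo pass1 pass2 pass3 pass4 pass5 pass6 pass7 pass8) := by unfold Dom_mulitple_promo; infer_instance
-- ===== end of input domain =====

-- ===== PORT A =====
-- B replaces A's single scan of pass1 with nested membership ifs by an outer loop over the
-- other seven passes that progressively filters the intermediate list (simpler decomposition).
def mulitple_promo (pass1 : List Int) (pass2 : List Int) (pass3 : List Int) (pass4 : List Int) (pass5 : List Int) (pass6 : List Int) (pass7 : List Int) (pass8 : List Int) : List Int :=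
  pass1.foldl (fun group_index i =>
    if pass2.contains i then
      if pass3.contains i then
        if pass4.contains i then
          if pass5.contains i then
            if pass6.contains i then
              if pass7.contains i then
                if pass8.contains i then group_index ++ [i]
                else group_index
              else group_index
            else group_index
          else group_index
        else group_index
      else group_index
    else group_index) []

-- ===== PORT B =====
def mulitple_promo_alt (pass1 : List Int) (pass2 : List Int) (pass3 : List Int) (pass4 : List Int) (pass5 : List Int) (pass6 : List Int) (pass7 : List Int) (pass8 : List Int) : List Int :=
  [pass2, pass3, pass4, pass5, pass6, pass7, pass8].foldl
    (fun result p => result.filter (fun i => p.contains i)) pass1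

-- ===== PRECONDITION & SPEC =====
def Spec_mulitple_promo (pass1 : List Int) (pass2 : List Int) (pass3 : List Int) (pass4 : List Int) (pass5 : List Int) (pass6 : List Int) (pass7 : List Int) (pass8 : List Int) (out : List Int) : Prop := out = mulitple_promo_alt pass1 pass2 pass3 pass4 pass5 pass6 pass7 pass8
instance (pass1 : List Int) (pass2 : List Int) (pass3 : List Int) (pass4 : List Int) (pass5 : List Int) (pass6 : List Int) (pass7 : List Int) (pass8 : List Int) (out : List Int) : Decidable (Spec_mulitple_promo pass1 pass2 pass3 pass4 pass5 pass6 pass7 pass8 out) := by unfold Spec_mulitple_promo; infer_instance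

-- ===== CLAIM (what is proved, stated in full; the proofs are below) =====
def Claim_equal_mulitple_promo : Prop := ∀ (pass1 : List Int) (pass2 : List Int) (pass3 : List Int) (pass4 : List Int) (pass5 : List Int) (pass6 : List Int) (pass7 : List Int) (pass8 : List Int), Dom_mulitple_promo pass1 pass2 pass3 pass4 pass5 pass6 pass7 pass8 → Spec_mulitple_promo pass1 pass2 pass3 pass4 pass5 pass6 pass7 pass8 (mulitple_promo pass1 pass2 pass3 pass4 pass5 pass6 pass7 pass8)

-- ===== LEMMAS AND PROOFS =====

-- ===== VERDICT (by name: the statement is the Claim_ definition above) =====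
-- A's loop, started from any accumulator, appends exactly the elements passing all seven tests.
theorem promoA_foldl (p2 p3 p4 p5 p6 p7 p8 : List Int) (l acc : List Int) :
    l.foldl (fun group_index i =>
      if p2.contains i then
        if p3.contains i then
          if p4.contains i then
            if p5.contains i then
              if p6.contains i then
                if p7.contains i then
                  if p8.contains i then group_index ++ [i]
                  else group_index
                else group_index
              else group_index
            else group_index
          else group_index
        else group_index
      else group_index) acc
    = acc ++ l.filter (fun i => p2.contains i && p3.contains i && p4.contains i &&
        p5.contains i && p6.contains i && p7.contains i && p8.contains i) := by
  induction l generalizing acc with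
  | nil => simp
  | cons x xs ih =>
    simp only [List.foldl_cons, List.filter_cons, ih]
    by_cases h2 : x ∈ p2 <;> by_cases h3 : x ∈ p3 <;>
      by_cases h4 : x ∈ p4 <;> by_cases h5 : x ∈ p5 <;>
      by_cases h6 : x ∈ p6 <;> by_cases h7 : x ∈ p7 <;>
      by_cases h8 : x ∈ p8 <;>
      simp [h2, h3, h4, h5, h6, h7, h8]

theorem mulitple_promo_spec : Claim_equal_mulitple_promo := by
  intro pass1 pass2 pass3 pass4 pass5 pass6 pass7 pass8 _
  show mulitple_promo _ _ _ _ _ _ _ _ = mulitple_promo_alt _ _ _ _ _ _ _ _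
  simp only [mulitple_promo, mulitple_promo_alt, List.foldl_cons, List.foldl_nil,
    promoA_foldl, List.nil_append, List.filter_filter]
  congr 1
  funext i
  by_cases h2 : i ∈ pass2 <;> by_cases h3 : i ∈ pass3 <;>
    by_cases h4 : i ∈ pass4 <;> by_cases h5 : i ∈ pass5 <;>
    by_cases h6 : i ∈ pass6 <;> by_cases h7 : i ∈ pass7 <;>
    by_cases h8 : i ∈ pass8 <;> simp [h2, h3, h4, h5, h6, h7, h8]
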